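-- pv_equiv track=rewrite | github.com/aturrisi-2/genesi | core/tts_sanitizer.py | _expand_titles
-- ===== SOURCE A (Python) =====
-- def _expand_titles(text: str) -> str:
--     """Espande titoli con punto."""
--     TITLE_MAP = {
--         "Sig.": "Signor",
--         "Sig.ra": "Signora",
--         "Dott.": "Dottor",
--         "Ing.": "Ingegnere",
--         "Prof.": "Professore",
--         "Avv.": "Avvocato",
--     }
--
--     # Sostituisci in modo semplice
--     for abbr, full in TITLE_MAP.items():
--         text = text.replace(abbr, full)
--
--     return text
-- ===== SOURCE B (Python) =====
-- def _expand_titles(text: str) -> str: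
--     """Espande titoli con punto (single left-to-right scan instead of six full-text passes)."""
--     TITLES = [
--         ("Sig.", "Signor"),
--         ("Sig.ra", "Signora"),
--         ("Dott.", "Dottor"),
--         ("Ing.", "Ingegnere"),
--         ("Prof.", "Professore"),
--         ("Avv.", "Avvocato"),
--     ]
--     out = []
--     i = 0
--     n = len(text)
--     while i < n:
--         for abbr, full in TITLES:
--             if text.startswith(abbr, i):
--                 out.append(full)
--                 i += len(abbr)
--                 break
--         else:
--             out.append(text[i])
--             i += 1
--     return "".join(out)
-- ===== Notes on version B (the rewrite author's own statement) =====
-- stated objective: alternative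
-- what changed: B makes a single left-to-right scan over the text, trying the abbreviations in dict order at each position and emitting either the expansion or the current character, instead of A's six sequential full-text replace passes.
import Mathlib
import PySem

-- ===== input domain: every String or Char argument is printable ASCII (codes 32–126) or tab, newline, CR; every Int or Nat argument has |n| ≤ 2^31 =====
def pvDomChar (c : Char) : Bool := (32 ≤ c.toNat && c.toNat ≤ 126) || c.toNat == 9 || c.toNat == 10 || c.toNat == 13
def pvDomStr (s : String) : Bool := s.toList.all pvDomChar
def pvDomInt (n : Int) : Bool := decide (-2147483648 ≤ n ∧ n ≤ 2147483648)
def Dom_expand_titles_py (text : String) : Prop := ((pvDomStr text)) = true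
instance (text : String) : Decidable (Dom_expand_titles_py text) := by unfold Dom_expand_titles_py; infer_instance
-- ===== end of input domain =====

-- B replaces A's six sequential full-text replace passes with a single left-to-right scan
-- that tries the abbreviations in dict order at each position (objective: alternative).

-- ===== PORT A =====
def pvTitleMap : PySem.Dict String String :=
  PySem.Dict.ofList [("Sig.", "Signor"), ("Sig.ra", "Signora"), ("Dott.", "Dottor"),
                     ("Ing.", "Ingegnere"), ("Prof.", "Professore"), ("Avv.", "Avvocato")]

def expand_titles_py (text : String) : String :=
  pvTitleMap.items.foldl (fun t kv => PySem.Str.replace t kv.1 kv.2) text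

-- ===== PORT B =====
-- transliteration of Source B's while loop: `out` is the list of pieces, the remaining
-- suffix of the text stands for the index i; pieces are joined by "" at the end.
def pvGoB : List Char → List (List Char) → List (List Char)
  | [], out => out
  | c :: t, out =>
    if ("Sig.".toList).isPrefixOf (c :: t) then pvGoB ((c :: t).drop 4) (out ++ ["Signor".toList])
    else if ("Sig.ra".toList).isPrefixOf (c :: t) then pvGoB ((c :: t).drop 6) (out ++ ["Signora".toList])
    else if ("Dott.".toList).isPrefixOf (c :: t) then pvGoB ((c :: t).drop 5) (out ++ ["Dottor".toList])
    else if ("Ing.".toList).isPrefixOf (c :: t) then pvGoB ((c :: t).drop 4) (out ++ ["Ingegnere".toList])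
    else if ("Prof.".toList).isPrefixOf (c :: t) then pvGoB ((c :: t).drop 5) (out ++ ["Professore".toList])
    else if ("Avv.".toList).isPrefixOf (c :: t) then pvGoB ((c :: t).drop 4) (out ++ ["Avvocato".toList])
    else pvGoB t (out ++ [[c]])
  termination_by l _ => l.length
  decreasing_by all_goals simp [List.length_drop]

def expand_titles_py_alt (text : String) : String :=
  String.ofList (PySem.Chars.join [] (pvGoB text.toList []))

-- ===== PRECONDITION & SPEC =====
def Spec_expand_titles_py (text : String) (out : String) : Prop := out = expand_titles_py_alt text
instance (text : String) (out : String) : Decidable (Spec_expand_titles_py text out) := by unfold Spec_expand_titles_py; infer_instance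

-- ===== CLAIM (what is proved, stated in full; the proofs are below) =====
def Claim_equal_expand_titles_py : Prop := ∀ (text : String), Dom_expand_titles_py text → Spec_expand_titles_py text (expand_titles_py text)

-- ===== LEMMAS AND PROOFS =====

-- fuel-indexed reformulation of PySem.Chars.replace.go (accumulator removed)
def pvRepc (p n : List Char) : Nat → List Char → List Char
  | 0, l => l
  | _+1, [] => []
  | fuel+1, c :: t =>
    if p.isPrefixOf (c :: t) then n ++ pvRepc p n fuel (List.drop p.length (c :: t))
    else c :: pvRepc p n fuel t

theorem pvGo_eq (p n : List Char) :
    ∀ fuel l acc, PySem.Chars.replace.go p n fuel l acc = acc.reverse ++ pvRepc p n fuel l := by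
  intro fuel
  induction fuel with
  | zero =>
    intro l acc
    rw [PySem.Chars.replace.go]
    rfl
  | succ f ih =>
    intro l acc
    cases l with
    | nil =>
      rw [PySem.Chars.replace.go]
      all_goals simp [pvRepc]
    | cons c t =>
      rw [PySem.Chars.replace.go]
      by_cases h : p.isPrefixOf (c :: t)
      · simp [h, pvRepc, ih]
      · simp [h, pvRepc, ih]

theorem pvRepc_nil (p n : List Char) : ∀ fuel, pvRepc p n fuel [] = [] := by
  intro fuel; cases fuel <;> rfl

theorem pvRepc_fuel (p n : List Char) (hp : p ≠ []) :
    ∀ f1 f2 l, l.length ≤ f1 → l.length ≤ f2 → pvRepc p n f1 l = pvRepc p n f2 l := by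
  intro f1
  induction f1 with
  | zero =>
    intro f2 l h1 _
    have hl : l = [] := List.eq_nil_of_length_eq_zero (Nat.le_zero.1 h1)
    subst hl
    simp [pvRepc_nil]
  | succ f ih =>
    intro f2 l h1 h2
    cases l with
    | nil => simp [pvRepc_nil]
    | cons c t =>
      cases f2 with
      | zero => simp at h2
      | succ f2' =>
        have hp1 : 1 ≤ p.length := List.length_pos_iff.2 hp
        simp only [pvRepc]
        simp only [List.length_cons] at h1 h2
        by_cases h : p.isPrefixOf (c :: t)
        · rw [if_pos h, if_pos h]
          have hd : (List.drop p.length (c :: t)).length ≤ f := by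
            simp only [List.length_drop, List.length_cons]; omega
          have hd2 : (List.drop p.length (c :: t)).length ≤ f2' := by
            simp only [List.length_drop, List.length_cons]; omega
          rw [ih f2' _ hd hd2]
        · rw [if_neg h, if_neg h]
          rw [ih f2' t (by omega) (by omega)]

theorem pvReplace_eq (p n l : List Char) (hp : p ≠ []) :
    PySem.Chars.replace l p n = pvRepc p n l.length l := by
  rw [PySem.Chars.replace, if_neg (by simp [hp]), pvGo_eq]
  rfl

theorem pvRep_nil (p n : List Char) (hp : p ≠ []) : PySem.Chars.replace [] p n = [] := by
  rw [pvReplace_eq _ _ _ hp]; rfl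

theorem pvRep_cons (p n : List Char) (c : Char) (t : List Char) (hp : p ≠ [])
    (h : ¬ p <+: (c :: t)) :
    PySem.Chars.replace (c :: t) p n = c :: PySem.Chars.replace t p n := by
  rw [pvReplace_eq _ _ _ hp, pvReplace_eq _ _ _ hp]
  simp only [List.length_cons, pvRepc]
  rw [if_neg (fun hb => h (List.isPrefixOf_iff_prefix.1 hb))]

theorem pvRep_match (p n l : List Char) (hp : p ≠ []) (h : p <+: l) :
    PySem.Chars.replace l p n = n ++ PySem.Chars.replace (List.drop p.length l) p n := by
  cases l with
  | nil =>
    have := List.eq_nil_of_prefix_nil h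
    exact absurd this hp
  | cons c t =>
    rw [pvReplace_eq _ _ _ hp, pvReplace_eq _ _ _ hp]
    have hp1 : 1 ≤ p.length := List.length_pos_iff.2 hp
    have hlen : p.length ≤ t.length + 1 := by
      have := h.length_le; simpa using this
    simp only [List.length_cons, pvRepc]
    rw [if_pos (List.isPrefixOf_iff_prefix.2 h)]
    congr 1
    exact pvRepc_fuel p n hp _ _ _ (by simp; omega) le_rfl

theorem pvPrefix_append_cases {p a x : List Char} (h : p <+: a ++ x) : p <+: a ∨ a <+: p := by
  rcases Nat.le_total p.length a.length with hle | hle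
  · exact Or.inl (List.prefix_of_prefix_length_le h (List.prefix_append a x) hle)
  · exact Or.inr (List.prefix_of_prefix_length_le (List.prefix_append a x) h hle)

theorem pvSkip (p n : List Char) (hp : p ≠ []) :
    ∀ w x, (∀ k, k < w.length → ¬ (List.drop k w <+: p) ∧ ¬ (p <+: List.drop k w)) →
      PySem.Chars.replace (w ++ x) p n = w ++ PySem.Chars.replace x p n := by
  intro w
  induction w with
  | nil => intro x _; rfl
  | cons c w' ih =>
    intro x hcond
    have h0 := hcond 0 (by simp)
    simp only [List.drop_zero] at h0
    have hnp : ¬ p <+: (c :: w') ++ x := by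
      intro hpre
      rcases pvPrefix_append_cases hpre with h | h
      · exact h0.2 h
      · exact h0.1 h
    rw [show (c :: w') ++ x = c :: (w' ++ x) from rfl] at hnp ⊢
    rw [pvRep_cons p n c (w' ++ x) hp hnp,
        ih x (fun k hk => by simpa using hcond (k + 1) (by simpa using hk))]
    rfl

theorem pvTransfer (q w : List Char) (hq : q ≠ []) :
    ∀ fuel X p', X.length ≤ fuel →
      (∀ r, r <:+ p' → r ≠ [] → ¬ (r <+: w) ∧ ¬ (w <+: r)) →
      p' <+: PySem.Chars.replace X q w → p' <+: X := by
  intro fuel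
  induction fuel with
  | zero =>
    intro X p' hl _ h
    have hX : X = [] := List.eq_nil_of_length_eq_zero (Nat.le_zero.1 hl)
    subst hX
    rw [pvRep_nil _ _ hq] at h
    exact h
  | succ f ih =>
    intro X p' hl hcond h
    cases X with
    | nil =>
      rw [pvRep_nil _ _ hq] at h
      exact h
    | cons c t =>
      by_cases hm : q <+: (c :: t)
      · rw [pvRep_match _ _ _ hq hm] at h
        cases p' with
        | nil => exact List.nil_prefix
        | cons c' p'' =>
          have hc := hcond (c' :: p'') (List.suffix_refl _) (by simp)
          rcases pvPrefix_append_cases h with h1 | h1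
          · exact absurd h1 hc.1
          · exact absurd h1 hc.2
      · rw [pvRep_cons _ _ _ _ hq hm] at h
        cases p' with
        | nil => exact List.nil_prefix
        | cons c' p'' =>
          rcases List.cons_prefix_cons.1 h with ⟨hc, ht⟩
          have hrec := ih t p'' (by simp only [List.length_cons] at hl; omega)
            (fun r hr hne => hcond r (hr.trans (List.suffix_cons c' p'')) hne) ht
          exact List.cons_prefix_cons.2 ⟨hc, hrec⟩

theorem pvTransfer' (q w p' : List Char) (hq : q ≠ [])
    (hcond : ∀ r ∈ p'.tails, r ≠ [] → ¬ (r <+: w) ∧ ¬ (w <+: r))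
    {X : List Char} (h : p' <+: PySem.Chars.replace X q w) : p' <+: X :=
  pvTransfer q w hq X.length X p' le_rfl
    (fun r hr hne => hcond r ((List.mem_tails r p').2 hr) hne) h

-- the six A-passes at character level, innermost first (dict order)
def pvCA (l : List Char) : List Char :=
  PySem.Chars.replace
    (PySem.Chars.replace
      (PySem.Chars.replace
        (PySem.Chars.replace
          (PySem.Chars.replace
            (PySem.Chars.replace l "Sig.".toList "Signor".toList)
            "Sig.ra".toList "Signora".toList)
          "Dott.".toList "Dottor".toList)
        "Ing.".toList "Ingegnere".toList)
      "Prof.".toList "Professore".toList)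
    "Avv.".toList "Avvocato".toList

-- B's scan without the piece accumulator
def pvScan : List Char → List Char
  | [] => []
  | c :: t =>
    if ("Sig.".toList).isPrefixOf (c :: t) then "Signor".toList ++ pvScan ((c :: t).drop 4)
    else if ("Sig.ra".toList).isPrefixOf (c :: t) then "Signora".toList ++ pvScan ((c :: t).drop 6)
    else if ("Dott.".toList).isPrefixOf (c :: t) then "Dottor".toList ++ pvScan ((c :: t).drop 5)
    else if ("Ing.".toList).isPrefixOf (c :: t) then "Ingegnere".toList ++ pvScan ((c :: t).drop 4)
    else if ("Prof.".toList).isPrefixOf (c :: t) then "Professore".toList ++ pvScan ((c :: t).drop 5)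
    else if ("Avv.".toList).isPrefixOf (c :: t) then "Avvocato".toList ++ pvScan ((c :: t).drop 4)
    else c :: pvScan t
  termination_by l => l.length
  decreasing_by all_goals simp [List.length_drop]

theorem pvJoin_snoc (out : List (List Char)) (x : List Char) :
    PySem.Chars.join [] (out ++ [x]) = PySem.Chars.join [] out ++ x := by
  induction out with
  | nil => simp [PySem.Chars.join_singleton, PySem.Chars.join_nil]
  | cons a out' ih =>
    cases out' with
    | nil =>
      rw [show ([a] : List (List Char)) ++ [x] = [a, x] from rfl,
          PySem.Chars.join_cons_cons, PySem.Chars.join_singleton, PySem.Chars.join_singleton]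
      simp
    | cons b out'' =>
      rw [show (a :: b :: out'') ++ [x] = a :: ((b :: out'') ++ [x]) from rfl]
      rw [show (b :: out'') ++ [x] = b :: (out'' ++ [x]) from rfl]
      rw [PySem.Chars.join_cons_cons, PySem.Chars.join_cons_cons]
      rw [show b :: (out'' ++ [x]) = (b :: out'') ++ [x] from rfl]
      rw [ih]
      simp

theorem pvGoB_join : ∀ fuel (l : List Char) (out : List (List Char)), l.length ≤ fuel →
    PySem.Chars.join [] (pvGoB l out) = PySem.Chars.join [] out ++ pvScan l := by
  intro fuel
  induction fuel with
  | zero =>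
    intro l out hl
    have : l = [] := List.eq_nil_of_length_eq_zero (Nat.le_zero.1 hl)
    subst this
    simp [pvGoB, pvScan]
  | succ f ih =>
    intro l out hl
    cases l with
    | nil => simp [pvGoB, pvScan]
    | cons c t =>
      simp only [List.length_cons] at hl
      simp only [pvGoB, pvScan]
      split_ifs with h1 h2 h3 h4 h5 h6 <;>
        rw [ih _ _ (by first
          | (simp only [List.length_drop, List.length_cons]; omega)
          | omega), pvJoin_snoc] <;>
        simp only [List.append_assoc, List.cons_append, List.nil_append]

theorem pvA_eq (text : String) : expand_titles_py text = String.ofList (pvCA text.toList) := by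
  rw [expand_titles_py]
  rw [show pvTitleMap.items =
    [("Sig.", "Signor"), ("Sig.ra", "Signora"), ("Dott.", "Dottor"),
     ("Ing.", "Ingegnere"), ("Prof.", "Professore"), ("Avv.", "Avvocato")] from rfl]
  simp [List.foldl, PySem.Str.replace, pvCA]

theorem pvB_eq (text : String) : expand_titles_py_alt text = String.ofList (pvScan text.toList) := by
  rw [expand_titles_py_alt]
  rw [pvGoB_join text.toList.length _ [] le_rfl]
  rw [PySem.Chars.join_nil]
  rfl

theorem pvCA_nil : pvCA [] = [] := by
  unfold pvCA
  rw [pvRep_nil _ _ (by decide), pvRep_nil _ _ (by decide), pvRep_nil _ _ (by decide),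
      pvRep_nil _ _ (by decide), pvRep_nil _ _ (by decide), pvRep_nil _ _ (by decide)]

theorem pvCaseSig (rest : List Char) :
    pvCA ("Sig.".toList ++ rest) = "Signor".toList ++ pvCA rest := by
  unfold pvCA
  rw [pvRep_match "Sig.".toList "Signor".toList _ (by decide) (List.prefix_append _ _), List.drop_left]
  rw [pvSkip "Sig.ra".toList "Signora".toList (by decide) "Signor".toList _ (by decide)]
  rw [pvSkip "Dott.".toList "Dottor".toList (by decide) "Signor".toList _ (by decide)]
  rw [pvSkip "Ing.".toList "Ingegnere".toList (by decide) "Signor".toList _ (by decide)]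
  rw [pvSkip "Prof.".toList "Professore".toList (by decide) "Signor".toList _ (by decide)]
  rw [pvSkip "Avv.".toList "Avvocato".toList (by decide) "Signor".toList _ (by decide)]

theorem pvCaseDott (rest : List Char) :
    pvCA ("Dott.".toList ++ rest) = "Dottor".toList ++ pvCA rest := by
  unfold pvCA
  rw [pvSkip "Sig.".toList "Signor".toList (by decide) "Dott.".toList _ (by decide)]
  rw [pvSkip "Sig.ra".toList "Signora".toList (by decide) "Dott.".toList _ (by decide)]
  rw [pvRep_match "Dott.".toList "Dottor".toList _ (by decide) (List.prefix_append _ _), List.drop_left]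
  rw [pvSkip "Ing.".toList "Ingegnere".toList (by decide) "Dottor".toList _ (by decide)]
  rw [pvSkip "Prof.".toList "Professore".toList (by decide) "Dottor".toList _ (by decide)]
  rw [pvSkip "Avv.".toList "Avvocato".toList (by decide) "Dottor".toList _ (by decide)]

theorem pvCaseIng (rest : List Char) :
    pvCA ("Ing.".toList ++ rest) = "Ingegnere".toList ++ pvCA rest := by
  unfold pvCA
  rw [pvSkip "Sig.".toList "Signor".toList (by decide) "Ing.".toList _ (by decide)]
  rw [pvSkip "Sig.ra".toList "Signora".toList (by decide) "Ing.".toList _ (by decide)]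
  rw [pvSkip "Dott.".toList "Dottor".toList (by decide) "Ing.".toList _ (by decide)]
  rw [pvRep_match "Ing.".toList "Ingegnere".toList _ (by decide) (List.prefix_append _ _), List.drop_left]
  rw [pvSkip "Prof.".toList "Professore".toList (by decide) "Ingegnere".toList _ (by decide)]
  rw [pvSkip "Avv.".toList "Avvocato".toList (by decide) "Ingegnere".toList _ (by decide)]

theorem pvCaseProf (rest : List Char) :
    pvCA ("Prof.".toList ++ rest) = "Professore".toList ++ pvCA rest := by
  unfold pvCA
  rw [pvSkip "Sig.".toList "Signor".toList (by decide) "Prof.".toList _ (by decide)]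
  rw [pvSkip "Sig.ra".toList "Signora".toList (by decide) "Prof.".toList _ (by decide)]
  rw [pvSkip "Dott.".toList "Dottor".toList (by decide) "Prof.".toList _ (by decide)]
  rw [pvSkip "Ing.".toList "Ingegnere".toList (by decide) "Prof.".toList _ (by decide)]
  rw [pvRep_match "Prof.".toList "Professore".toList _ (by decide) (List.prefix_append _ _), List.drop_left]
  rw [pvSkip "Avv.".toList "Avvocato".toList (by decide) "Professore".toList _ (by decide)]

theorem pvCaseAvv (rest : List Char) :
    pvCA ("Avv.".toList ++ rest) = "Avvocato".toList ++ pvCA rest := by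
  unfold pvCA
  rw [pvSkip "Sig.".toList "Signor".toList (by decide) "Avv.".toList _ (by decide)]
  rw [pvSkip "Sig.ra".toList "Signora".toList (by decide) "Avv.".toList _ (by decide)]
  rw [pvSkip "Dott.".toList "Dottor".toList (by decide) "Avv.".toList _ (by decide)]
  rw [pvSkip "Ing.".toList "Ingegnere".toList (by decide) "Avv.".toList _ (by decide)]
  rw [pvSkip "Prof.".toList "Professore".toList (by decide) "Avv.".toList _ (by decide)]
  rw [pvRep_match "Avv.".toList "Avvocato".toList _ (by decide) (List.prefix_append _ _), List.drop_left]

theorem pvCaseNone (c : Char) (t : List Char)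
    (h1 : ¬ ("Sig.".toList) <+: (c :: t))
    (h2 : ¬ ("Sig.ra".toList) <+: (c :: t))
    (h3 : ¬ ("Dott.".toList) <+: (c :: t))
    (h4 : ¬ ("Ing.".toList) <+: (c :: t))
    (h5 : ¬ ("Prof.".toList) <+: (c :: t))
    (h6 : ¬ ("Avv.".toList) <+: (c :: t))
    : pvCA (c :: t) = c :: pvCA t := by
  unfold pvCA
  rw [pvRep_cons _ _ _ _ (by decide) h1]
  set Y1 := PySem.Chars.replace t "Sig.".toList "Signor".toList with hY1
  have k2 : ¬ ("Sig.ra".toList) <+: c :: Y1 := by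
    intro hpre
    rw [show ("Sig.ra".toList) = 'S' :: "ig.ra".toList from rfl] at hpre
    rcases List.cons_prefix_cons.1 hpre with ⟨hc, htl⟩
    rw [hY1] at htl
    have s1 := pvTransfer' "Sig.".toList "Signor".toList "ig.ra".toList (by decide) (by decide) htl
    exact h2 (by rw [show ("Sig.ra".toList) = 'S' :: "ig.ra".toList from rfl]; exact List.cons_prefix_cons.2 ⟨hc, s1⟩)
  rw [pvRep_cons _ _ _ _ (by decide) k2]
  set Y2 := PySem.Chars.replace Y1 "Sig.ra".toList "Signora".toList with hY2
  have k3 : ¬ ("Dott.".toList) <+: c :: Y2 := by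
    intro hpre
    rw [show ("Dott.".toList) = 'D' :: "ott.".toList from rfl] at hpre
    rcases List.cons_prefix_cons.1 hpre with ⟨hc, htl⟩
    rw [hY2] at htl
    have s2 := pvTransfer' "Sig.ra".toList "Signora".toList "ott.".toList (by decide) (by decide) htl
    rw [hY1] at s2
    have s1 := pvTransfer' "Sig.".toList "Signor".toList "ott.".toList (by decide) (by decide) s2
    exact h3 (by rw [show ("Dott.".toList) = 'D' :: "ott.".toList from rfl]; exact List.cons_prefix_cons.2 ⟨hc, s1⟩)
  rw [pvRep_cons _ _ _ _ (by decide) k3]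
  set Y3 := PySem.Chars.replace Y2 "Dott.".toList "Dottor".toList with hY3
  have k4 : ¬ ("Ing.".toList) <+: c :: Y3 := by
    intro hpre
    rw [show ("Ing.".toList) = 'I' :: "ng.".toList from rfl] at hpre
    rcases List.cons_prefix_cons.1 hpre with ⟨hc, htl⟩
    rw [hY3] at htl
    have s3 := pvTransfer' "Dott.".toList "Dottor".toList "ng.".toList (by decide) (by decide) htl
    rw [hY2] at s3
    have s2 := pvTransfer' "Sig.ra".toList "Signora".toList "ng.".toList (by decide) (by decide) s3
    rw [hY1] at s2
    have s1 := pvTransfer' "Sig.".toList "Signor".toList "ng.".toList (by decide) (by decide) s2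
    exact h4 (by rw [show ("Ing.".toList) = 'I' :: "ng.".toList from rfl]; exact List.cons_prefix_cons.2 ⟨hc, s1⟩)
  rw [pvRep_cons _ _ _ _ (by decide) k4]
  set Y4 := PySem.Chars.replace Y3 "Ing.".toList "Ingegnere".toList with hY4
  have k5 : ¬ ("Prof.".toList) <+: c :: Y4 := by
    intro hpre
    rw [show ("Prof.".toList) = 'P' :: "rof.".toList from rfl] at hpre
    rcases List.cons_prefix_cons.1 hpre with ⟨hc, htl⟩
    rw [hY4] at htl
    have s4 := pvTransfer' "Ing.".toList "Ingegnere".toList "rof.".toList (by decide) (by decide) htl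
    rw [hY3] at s4
    have s3 := pvTransfer' "Dott.".toList "Dottor".toList "rof.".toList (by decide) (by decide) s4
    rw [hY2] at s3
    have s2 := pvTransfer' "Sig.ra".toList "Signora".toList "rof.".toList (by decide) (by decide) s3
    rw [hY1] at s2
    have s1 := pvTransfer' "Sig.".toList "Signor".toList "rof.".toList (by decide) (by decide) s2
    exact h5 (by rw [show ("Prof.".toList) = 'P' :: "rof.".toList from rfl]; exact List.cons_prefix_cons.2 ⟨hc, s1⟩)
  rw [pvRep_cons _ _ _ _ (by decide) k5]
  set Y5 := PySem.Chars.replace Y4 "Prof.".toList "Professore".toList with hY5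
  have k6 : ¬ ("Avv.".toList) <+: c :: Y5 := by
    intro hpre
    rw [show ("Avv.".toList) = 'A' :: "vv.".toList from rfl] at hpre
    rcases List.cons_prefix_cons.1 hpre with ⟨hc, htl⟩
    rw [hY5] at htl
    have s5 := pvTransfer' "Prof.".toList "Professore".toList "vv.".toList (by decide) (by decide) htl
    rw [hY4] at s5
    have s4 := pvTransfer' "Ing.".toList "Ingegnere".toList "vv.".toList (by decide) (by decide) s5
    rw [hY3] at s4
    have s3 := pvTransfer' "Dott.".toList "Dottor".toList "vv.".toList (by decide) (by decide) s4
    rw [hY2] at s3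
    have s2 := pvTransfer' "Sig.ra".toList "Signora".toList "vv.".toList (by decide) (by decide) s3
    rw [hY1] at s2
    have s1 := pvTransfer' "Sig.".toList "Signor".toList "vv.".toList (by decide) (by decide) s2
    exact h6 (by rw [show ("Avv.".toList) = 'A' :: "vv.".toList from rfl]; exact List.cons_prefix_cons.2 ⟨hc, s1⟩)
  rw [pvRep_cons _ _ _ _ (by decide) k6]


theorem pvMain : ∀ fuel (l : List Char), l.length ≤ fuel → pvCA l = pvScan l := by
  intro fuel
  induction fuel with
  | zero =>
    intro l hl
    have hnil : l = [] := List.eq_nil_of_length_eq_zero (Nat.le_zero.1 hl)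
    subst hnil
    rw [pvCA_nil]
    simp [pvScan]
  | succ f ih =>
    intro l hl
    cases l with
    | nil => rw [pvCA_nil]; simp [pvScan]
    | cons c t =>
      simp only [List.length_cons] at hl
      by_cases h1 : ("Sig.".toList) <+: (c :: t)
      · obtain ⟨rest, hrest⟩ := h1
        have hdrop : List.drop 4 (c :: t) = rest := by
          rw [← hrest, show ((4:Nat)) = ("Sig.".toList).length from rfl, List.drop_left]
        have hlen : rest.length ≤ f := by
          have hlr := congrArg List.length hrest
          simp only [List.length_append, List.length_cons] at hlr
          have hpl : ("Sig.".toList).length = 4 := rfl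
          omega
        conv_lhs => rw [← hrest]
        rw [pvCaseSig rest, ih rest hlen]
        have h1' : ("Sig.".toList) <+: (c :: t) := ⟨rest, hrest⟩
        simp only [pvScan]
        rw [if_pos (List.isPrefixOf_iff_prefix.2 h1'),
            hdrop]
      by_cases h2 : ("Sig.ra".toList) <+: (c :: t)
      · -- unreachable: Sig. is a prefix of Sig.ra
        exact absurd ((show ("Sig.".toList) <+: ("Sig.ra".toList) by decide).trans h2) h1
      by_cases h3 : ("Dott.".toList) <+: (c :: t)
      · obtain ⟨rest, hrest⟩ := h3
        have hdrop : List.drop 5 (c :: t) = rest := by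
          rw [← hrest, show ((5:Nat)) = ("Dott.".toList).length from rfl, List.drop_left]
        have hlen : rest.length ≤ f := by
          have hlr := congrArg List.length hrest
          simp only [List.length_append, List.length_cons] at hlr
          have hpl : ("Dott.".toList).length = 5 := rfl
          omega
        conv_lhs => rw [← hrest]
        rw [pvCaseDott rest, ih rest hlen]
        have h3' : ("Dott.".toList) <+: (c :: t) := ⟨rest, hrest⟩
        simp only [pvScan]
        rw [if_neg (fun hb => h1 (List.isPrefixOf_iff_prefix.1 hb)),
            if_neg (fun hb => h2 (List.isPrefixOf_iff_prefix.1 hb)),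
            if_pos (List.isPrefixOf_iff_prefix.2 h3'),
            hdrop]
      by_cases h4 : ("Ing.".toList) <+: (c :: t)
      · obtain ⟨rest, hrest⟩ := h4
        have hdrop : List.drop 4 (c :: t) = rest := by
          rw [← hrest, show ((4:Nat)) = ("Ing.".toList).length from rfl, List.drop_left]
        have hlen : rest.length ≤ f := by
          have hlr := congrArg List.length hrest
          simp only [List.length_append, List.length_cons] at hlr
          have hpl : ("Ing.".toList).length = 4 := rfl
          omega
        conv_lhs => rw [← hrest]
        rw [pvCaseIng rest, ih rest hlen]
        have h4' : ("Ing.".toList) <+: (c :: t) := ⟨rest, hrest⟩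
        simp only [pvScan]
        rw [if_neg (fun hb => h1 (List.isPrefixOf_iff_prefix.1 hb)),
            if_neg (fun hb => h2 (List.isPrefixOf_iff_prefix.1 hb)),
            if_neg (fun hb => h3 (List.isPrefixOf_iff_prefix.1 hb)),
            if_pos (List.isPrefixOf_iff_prefix.2 h4'),
            hdrop]
      by_cases h5 : ("Prof.".toList) <+: (c :: t)
      · obtain ⟨rest, hrest⟩ := h5
        have hdrop : List.drop 5 (c :: t) = rest := by
          rw [← hrest, show ((5:Nat)) = ("Prof.".toList).length from rfl, List.drop_left]
        have hlen : rest.length ≤ f := by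
          have hlr := congrArg List.length hrest
          simp only [List.length_append, List.length_cons] at hlr
          have hpl : ("Prof.".toList).length = 5 := rfl
          omega
        conv_lhs => rw [← hrest]
        rw [pvCaseProf rest, ih rest hlen]
        have h5' : ("Prof.".toList) <+: (c :: t) := ⟨rest, hrest⟩
        simp only [pvScan]
        rw [if_neg (fun hb => h1 (List.isPrefixOf_iff_prefix.1 hb)),
            if_neg (fun hb => h2 (List.isPrefixOf_iff_prefix.1 hb)),
            if_neg (fun hb => h3 (List.isPrefixOf_iff_prefix.1 hb)),
            if_neg (fun hb => h4 (List.isPrefixOf_iff_prefix.1 hb)),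
            if_pos (List.isPrefixOf_iff_prefix.2 h5'),
            hdrop]
      by_cases h6 : ("Avv.".toList) <+: (c :: t)
      · obtain ⟨rest, hrest⟩ := h6
        have hdrop : List.drop 4 (c :: t) = rest := by
          rw [← hrest, show ((4:Nat)) = ("Avv.".toList).length from rfl, List.drop_left]
        have hlen : rest.length ≤ f := by
          have hlr := congrArg List.length hrest
          simp only [List.length_append, List.length_cons] at hlr
          have hpl : ("Avv.".toList).length = 4 := rfl
          omega
        conv_lhs => rw [← hrest]
        rw [pvCaseAvv rest, ih rest hlen]
        have h6' : ("Avv.".toList) <+: (c :: t) := ⟨rest, hrest⟩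
        simp only [pvScan]
        rw [if_neg (fun hb => h1 (List.isPrefixOf_iff_prefix.1 hb)),
            if_neg (fun hb => h2 (List.isPrefixOf_iff_prefix.1 hb)),
            if_neg (fun hb => h3 (List.isPrefixOf_iff_prefix.1 hb)),
            if_neg (fun hb => h4 (List.isPrefixOf_iff_prefix.1 hb)),
            if_neg (fun hb => h5 (List.isPrefixOf_iff_prefix.1 hb)),
            if_pos (List.isPrefixOf_iff_prefix.2 h6'),
            hdrop]
      rw [pvCaseNone c t h1 h2 h3 h4 h5 h6, ih t (by omega)]
      simp only [pvScan]
      rw [if_neg (fun hb => h1 (List.isPrefixOf_iff_prefix.1 hb)),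
          if_neg (fun hb => h2 (List.isPrefixOf_iff_prefix.1 hb)),
          if_neg (fun hb => h3 (List.isPrefixOf_iff_prefix.1 hb)),
          if_neg (fun hb => h4 (List.isPrefixOf_iff_prefix.1 hb)),
          if_neg (fun hb => h5 (List.isPrefixOf_iff_prefix.1 hb)),
          if_neg (fun hb => h6 (List.isPrefixOf_iff_prefix.1 hb))]

-- ===== VERDICT (by name: the statement is the Claim_ definition above) =====
theorem expand_titles_py_spec : Claim_equal_expand_titles_py := by
  intro text _
  unfold Spec_expand_titles_py
  rw [pvA_eq, pvB_eq, pvMain text.toList.length text.toList le_rfl]
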